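-- pv_equiv track=rewrite | github.com/GetTalkDrops/plant-intel-mvp | ml-service/ai/pattern_explainer.py | _identify_supplier_data_gaps
-- ===== SOURCE A (Python) =====
-- from typing import Dict, List, Optional
--
-- def _identify_supplier_data_gaps(work_orders: List[Dict]) -> List[Dict]:
--     """Identify missing supplier-related data"""
--     gaps = []
--
--     if not any(wo.get('contract_expiration') for wo in work_orders):
--         gaps.append({
--             'field': 'contract_expiration',
--             'impact': 'high',
--             'description': 'Cannot track supplier contract renewals and pricing changes'
--         })
--
--     if not any(wo.get('purchase_order_number') for wo in work_orders):
--         gaps.append({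
--             'field': 'purchase_order_number',
--             'impact': 'low',
--             'description': 'Cannot link to procurement records'
--         })
--
--     return gaps
-- ===== SOURCE B (Python) =====
-- _SUPPLIER_FIELD_SPECS = (
--     {'field': 'contract_expiration', 'impact': 'high',
--      'description': 'Cannot track supplier contract renewals and pricing changes'},
--     {'field': 'purchase_order_number', 'impact': 'low',
--      'description': 'Cannot link to procurement records'},
-- )
--
--
-- def _identify_supplier_data_gaps(work_orders):
--     """Identify missing supplier-related data"""
--     candidates = list(_SUPPLIER_FIELD_SPECS)
--     for wo in work_orders:
--         if not candidates:
--             break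
--         candidates = [spec for spec in candidates if not wo.get(spec['field'])]
--     return [dict(spec) for spec in candidates]
-- ===== Notes on version B (the rewrite author's own statement) =====
-- stated objective: alternative
-- what changed: Instead of two field-major any() scans each restarting over the records, B makes one record-major narrowing pass: it starts with the full ordered gap-spec table as candidates, filters out of it every spec whose field is truthy in the current record, and stops early once no candidate is left; whatever survives the pass is the gap list.
import Mathlib
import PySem

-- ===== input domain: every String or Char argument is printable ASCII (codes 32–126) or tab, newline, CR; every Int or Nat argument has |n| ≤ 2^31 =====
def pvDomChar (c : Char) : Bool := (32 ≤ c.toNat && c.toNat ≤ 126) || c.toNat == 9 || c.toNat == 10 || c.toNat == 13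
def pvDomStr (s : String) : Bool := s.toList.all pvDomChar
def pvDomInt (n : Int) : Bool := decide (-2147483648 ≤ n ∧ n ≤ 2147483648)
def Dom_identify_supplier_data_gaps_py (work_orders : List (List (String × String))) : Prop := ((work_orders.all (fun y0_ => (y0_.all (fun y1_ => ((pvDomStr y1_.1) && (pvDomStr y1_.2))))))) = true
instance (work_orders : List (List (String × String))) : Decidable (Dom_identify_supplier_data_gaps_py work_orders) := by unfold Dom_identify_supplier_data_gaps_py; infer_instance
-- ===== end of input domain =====

-- B replaces A's two field-major any() scans by one record-major narrowing pass over a candidate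
-- gap-spec table, with an early exit once no candidate remains (objective: alternative, same cost).

-- ===== PORT A =====
-- truthiness of wo.get(field): None (missing key) and '' are falsy, any other string truthy
def pvTruthy (wo : List (String × String)) (f : String) : Bool :=
  match PySem.Dict.get? (PySem.Dict.mk wo) f with
  | none => false
  | some s => s ≠ ""

def identify_supplier_data_gaps_py (work_orders : List (List (String × String))) : List (List (String × String)) :=
  let gaps : List (List (String × String)) := []
  let gaps := if work_orders.any (fun wo => pvTruthy wo "contract_expiration") then gaps
    else gaps ++ [[("field", "contract_expiration"), ("impact", "high"),
                   ("description", "Cannot track supplier contract renewals and pricing changes")]]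
  let gaps := if work_orders.any (fun wo => pvTruthy wo "purchase_order_number") then gaps
    else gaps ++ [[("field", "purchase_order_number"), ("impact", "low"),
                   ("description", "Cannot link to procurement records")]]
  gaps

-- ===== PORT B =====
def pvSupplierFieldSpecs : List (List (String × String)) :=
  [[("field", "contract_expiration"), ("impact", "high"),
    ("description", "Cannot track supplier contract renewals and pricing changes")],
   [("field", "purchase_order_number"), ("impact", "low"),
    ("description", "Cannot link to procurement records")]]

-- spec['field']: exact for the literal specs above, which all carry the key
def pvField (spec : List (String × String)) : String :=
  PySem.Dict.getD (PySem.Dict.mk spec) "field" ""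

-- the narrowing loop of Source B: for wo in work_orders: if not candidates: break; candidates = [...]
def pvNarrow (cands : List (List (String × String))) :
    List (List (String × String)) → List (List (String × String))
  | [] => cands
  | wo :: rest =>
      if cands.isEmpty then cands
      else pvNarrow (cands.filter (fun spec => ! pvTruthy wo (pvField spec))) rest

def identify_supplier_data_gaps_py_alt (work_orders : List (List (String × String))) : List (List (String × String)) :=
  pvNarrow pvSupplierFieldSpecs work_orders

-- ===== PRECONDITION & SPEC =====
def Spec_identify_supplier_data_gaps_py (work_orders : List (List (String × String))) (out : List (List (String × String))) : Prop := out = identify_supplier_data_gaps_py_alt work_orders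
instance (work_orders : List (List (String × String))) (out : List (List (String × String))) : Decidable (Spec_identify_supplier_data_gaps_py work_orders out) := by unfold Spec_identify_supplier_data_gaps_py; infer_instance

-- ===== CLAIM (what is proved, stated in full; the proofs are below) =====
def Claim_equal_identify_supplier_data_gaps_py : Prop := ∀ (work_orders : List (List (String × String))), Dom_identify_supplier_data_gaps_py work_orders → Spec_identify_supplier_data_gaps_py work_orders (identify_supplier_data_gaps_py work_orders)

-- ===== LEMMAS AND PROOFS =====

-- the narrowing loop computes a filter by the 'never truthy in any record' predicate
lemma pvNarrow_eq_filter (wos : List (List (String × String)))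
    (cands : List (List (String × String))) :
    pvNarrow cands wos
      = cands.filter (fun spec => ! wos.any (fun wo => pvTruthy wo (pvField spec))) := by
  induction wos generalizing cands with
  | nil => simp [pvNarrow]
  | cons wo rest ih =>
      by_cases hc : cands = []
      · subst hc; simp [pvNarrow]
      · rw [pvNarrow, if_neg (by simpa [List.isEmpty_iff] using hc), ih,
          List.filter_filter]
        apply List.filter_congr
        intro spec _
        simp [List.any_cons, Bool.not_or, Bool.and_comm]

theorem identify_supplier_data_gaps_py_spec : Claim_equal_identify_supplier_data_gaps_py := by
  intro wos _
  unfold Spec_identify_supplier_data_gaps_py identify_supplier_data_gaps_py identify_supplier_data_gaps_py_alt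
  rw [pvNarrow_eq_filter]
  rw [show pvSupplierFieldSpecs = [pvSupplierFieldSpecs[0], pvSupplierFieldSpecs[1]] from rfl]
  simp only [List.filter_cons, List.filter_nil]
  rw [show pvField pvSupplierFieldSpecs[0] = "contract_expiration" from rfl,
      show pvField pvSupplierFieldSpecs[1] = "purchase_order_number" from rfl]
  cases h1 : wos.any (fun wo => pvTruthy wo "contract_expiration") <;>
  cases h2 : wos.any (fun wo => pvTruthy wo "purchase_order_number") <;>
  simp [pvSupplierFieldSpecs]
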